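-- pv_equiv track=rewrite | github.com/Fondamenti18/fondamenti-di-programmazione | students/1753608/homework03/program02.py | check
-- ===== SOURCE A (Python) =====
-- def get_index(i):
--     return i % 4
--
-- def update(y,x,direction):
--     if(direction == "right"):
--         x+=40
--     elif(direction == "down"):
--         y+=40
--     elif(direction == "left"):
--         x-=40
--     elif(direction == "up"):
--         y-=40
--     return y,x
--
-- def check(img,passed,y,x,directions,i,start_i):
--     i = get_index(i)
--     up = update(y,x,directions[i])
--     start_x = x
--     start_y = y
--     y = up[0]
--     x = up[1]
--     try:
--         if(x < 0 or y < 0):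
--             next_one = (255,0,0)
--         else:
--             next_one = img[y][x]
--     except:
--         next_one = (255,0,0)
--         pass
--     if(next_one != (255,0,0) and
--        (y,x) not in passed ):
--         return i
--     else:
--         i = get_index(i+1)
--     if(get_index(i) == start_i): return -1
--     return check(img,passed,start_y,start_x,directions,i,start_i)
-- ===== SOURCE B (Python) =====
-- def check(img, passed, y, x, directions, i, start_i):
--     offsets = {"right": (0, 40), "down": (40, 0), "left": (0, -40), "up": (-40, 0)}
--     first = i % 4
--     order = [first]
--     for k in range(1, 4):
--         j = (first + k) % 4
--         if j == start_i:
--             break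
--         order.append(j)
--     for j in order:
--         dy, dx = offsets.get(directions[j], (0, 0))
--         ny, nx = y + dy, x + dx
--         if ny >= 0 and nx >= 0:
--             try:
--                 pixel = img[ny][nx]
--             except IndexError:
--                 continue
--             if pixel != (255, 0, 0) and (ny, nx) not in passed:
--                 return j
--     return -1
-- ===== Notes on version B (the rewrite author's own statement) =====
-- stated objective: alternative
-- what changed: A is a recursive state machine that re-normalises the index, mutates coordinates through an if-chain helper and recurses with a wrap test; B precomputes the list of candidate direction indices in cyclic order (truncated at start_i) and does one first-match scan over it using an offset dictionary and an explicit bounds guard.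
import Mathlib
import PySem

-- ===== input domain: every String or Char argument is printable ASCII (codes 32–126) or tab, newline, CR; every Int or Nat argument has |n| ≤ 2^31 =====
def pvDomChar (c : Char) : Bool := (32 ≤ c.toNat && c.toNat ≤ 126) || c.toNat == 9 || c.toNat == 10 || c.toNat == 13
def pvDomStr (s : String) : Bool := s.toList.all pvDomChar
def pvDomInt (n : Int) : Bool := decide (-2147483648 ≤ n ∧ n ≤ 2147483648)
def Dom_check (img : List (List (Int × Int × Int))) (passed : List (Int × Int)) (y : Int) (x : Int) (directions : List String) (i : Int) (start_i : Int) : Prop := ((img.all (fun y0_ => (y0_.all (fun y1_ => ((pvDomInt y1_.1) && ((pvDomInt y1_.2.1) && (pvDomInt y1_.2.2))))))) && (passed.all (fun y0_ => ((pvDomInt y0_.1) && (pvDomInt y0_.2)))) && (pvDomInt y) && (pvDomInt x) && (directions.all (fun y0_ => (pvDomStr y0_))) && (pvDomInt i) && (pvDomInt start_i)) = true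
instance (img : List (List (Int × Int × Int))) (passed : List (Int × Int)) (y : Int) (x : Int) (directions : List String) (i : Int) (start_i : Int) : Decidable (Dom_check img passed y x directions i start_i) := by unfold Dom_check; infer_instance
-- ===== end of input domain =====

-- B replaces A's recursive state machine by "build the cyclic candidate list, then one first-match scan"
-- (objective: alternative decomposition, same cost). Equality is about return values; neither version mutates its arguments.

-- ===== PORT A =====
def get_index (i : Int) : Int := PySem.Int.mod i 4

def update (y : Int) (x : Int) (direction : String) : Int × Int :=
  if direction = "right" then (y, x + 40)
  else if direction = "down" then (y + 40, x)
  else if direction = "left" then (y, x - 40)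
  else if direction = "up" then (y - 40, x)
  else (y, x)

-- A recurses; under Pre_check it makes at most 4 calls, so fuel 4 makes the same computation total
-- (the fuel-exhaustion value -1 is never reached inside Pre_check).
def checkFuel : Nat → List (List (Int × Int × Int)) → List (Int × Int) → Int → Int → List String → Int → Int → Int
  | 0, _, _, _, _, _, _, _ => -1
  | n + 1, img, passed, y, x, directions, i, start_i =>
    let i1 := get_index i
    let up := update y x ((PySem.List.pyGet? directions i1).getD "")
    let start_x := x
    let start_y := y
    let y1 := up.1
    let x1 := up.2
    let next_one : Int × Int × Int :=
      if x1 < 0 ∨ y1 < 0 then (255, 0, 0)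
      else ((PySem.List.pyGet? img y1).bind (fun row => PySem.List.pyGet? row x1)).getD (255, 0, 0)
    if next_one ≠ (255, 0, 0) ∧ ¬ (y1, x1) ∈ passed then i1
    else
      let i2 := get_index (i1 + 1)
      if get_index i2 = start_i then -1
      else checkFuel n img passed start_y start_x directions i2 start_i

def check (img : List (List (Int × Int × Int))) (passed : List (Int × Int)) (y : Int) (x : Int) (directions : List String) (i : Int) (start_i : Int) : Int :=
  checkFuel 4 img passed y x directions i start_i

-- ===== PORT B =====
def pvOffsets : PySem.Dict String (Int × Int) :=
  PySem.Dict.ofList [("right", (0, 40)), ("down", (40, 0)), ("left", (0, -40)), ("up", (-40, 0))]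

-- the 'for k in range(1, 4): … break' loop building `order`
def orderFrom (first : Int) (start_i : Int) : List Int → List Int
  | [] => []
  | k :: rest =>
    let j := PySem.Int.mod (first + k) 4
    if j = start_i then [] else j :: orderFrom first start_i rest

-- the 'for j in order' first-match scan
def scanDirs (img : List (List (Int × Int × Int))) (passed : List (Int × Int)) (y : Int) (x : Int) (directions : List String) : List Int → Int
  | [] => -1
  | j :: rest =>
    let off := pvOffsets.getD ((PySem.List.pyGet? directions j).getD "") (0, 0)
    let ny := y + off.1
    let nx := x + off.2
    if 0 ≤ ny ∧ 0 ≤ nx then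
      match (PySem.List.pyGet? img ny).bind (fun row => PySem.List.pyGet? row nx) with
      | none => scanDirs img passed y x directions rest
      | some pixel =>
        if pixel ≠ (255, 0, 0) ∧ ¬ (ny, nx) ∈ passed then j
        else scanDirs img passed y x directions rest
    else scanDirs img passed y x directions rest

def check_alt (img : List (List (Int × Int × Int))) (passed : List (Int × Int)) (y : Int) (x : Int) (directions : List String) (i : Int) (start_i : Int) : Int :=
  let first := PySem.Int.mod i 4
  scanDirs img passed y x directions (first :: orderFrom first start_i [1, 2, 3])

-- ===== PRECONDITION & SPEC =====
-- Per-direction success test (would direction index j move to a non-red, unvisited, in-bounds pixel);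
-- used only by Pre_check, written directly from the problem data, independent of both ports.
def pvOk (img : List (List (Int × Int × Int))) (passed : List (Int × Int)) (y : Int) (x : Int) (directions : List String) (j : Int) : Bool :=
  let d := (PySem.List.pyGet? directions j).getD ""
  let ny := y + (if d = "down" then 40 else if d = "up" then -40 else 0)
  let nx := x + (if d = "right" then 40 else if d = "left" then -40 else 0)
  if nx < 0 ∨ ny < 0 then false
  else
    match (PySem.List.pyGet? img ny).bind (fun row => PySem.List.pyGet? row nx) with
    | none => false
    | some p => decide (¬ p = ((255, 0, 0) : Int × Int × Int) ∧ ¬ (ny, nx) ∈ passed)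

-- Pre_ excludes exactly the inputs on which the Python A raises instead of returning: those where A consults a
-- direction index past the end of `directions` before stopping (IndexError) and those where it never succeeds
-- nor wraps to start_i (unbounded recursion, RecursionError). A stops at step t (t-th consulted index is
-- (i+t) % 4) when that direction succeeds, or wraps when (i+t+1) % 4 = start_i; Pre_ says some step t ≤ 3
-- stops with every consulted index up to it in range.
def Pre_check (img : List (List (Int × Int × Int))) (passed : List (Int × Int)) (y : Int) (x : Int) (directions : List String) (i : Int) (start_i : Int) : Prop :=
  ∃ t ∈ ([0, 1, 2, 3] : List Int),
    (∀ t' ∈ ([0, 1, 2, 3] : List Int), t' ≤ t → PySem.Int.mod (i + t') 4 < (directions.length : Int))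
    ∧ (pvOk img passed y x directions (PySem.Int.mod (i + t) 4) = true
       ∨ PySem.Int.mod (i + t + 1) 4 = start_i)
instance (img : List (List (Int × Int × Int))) (passed : List (Int × Int)) (y : Int) (x : Int) (directions : List String) (i : Int) (start_i : Int) : Decidable (Pre_check img passed y x directions i start_i) := by unfold Pre_check; infer_instance

def pvWitness_check : (List (List (Int × Int × Int))) × (List (Int × Int)) × Int × Int × List String × Int × Int :=
  ([], [], 0, 0, ["up", "up", "up", "up"], 0, 0)

def Spec_check (img : List (List (Int × Int × Int))) (passed : List (Int × Int)) (y : Int) (x : Int) (directions : List String) (i : Int) (start_i : Int) (out : Int) : Prop := out = check_alt img passed y x directions i start_i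
instance (img : List (List (Int × Int × Int))) (passed : List (Int × Int)) (y : Int) (x : Int) (directions : List String) (i : Int) (start_i : Int) (out : Int) : Decidable (Spec_check img passed y x directions i start_i out) := by unfold Spec_check; infer_instance

-- ===== CLAIM (what is proved, stated in full; the proofs are below) =====
def Claim_equal_check : Prop := ∀ (img : List (List (Int × Int × Int))) (passed : List (Int × Int)) (y : Int) (x : Int) (directions : List String) (i : Int) (start_i : Int), Dom_check img passed y x directions i start_i → Pre_check img passed y x directions i start_i → Spec_check img passed y x directions i start_i (check img passed y x directions i start_i)

-- ===== LEMMAS AND PROOFS =====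

-- the common per-direction success test, phrased in A's shape
def stepCond (img : List (List (Int × Int × Int))) (passed : List (Int × Int)) (y : Int) (x : Int) (directions : List String) (j : Int) : Bool :=
  let up := update y x ((PySem.List.pyGet? directions j).getD "")
  decide ((if up.2 < 0 ∨ up.1 < 0 then ((255, 0, 0) : Int × Int × Int)
    else ((PySem.List.pyGet? img up.1).bind (fun row => PySem.List.pyGet? row up.2)).getD (255, 0, 0)) ≠ (255, 0, 0)
   ∧ ¬ (up.1, up.2) ∈ passed)

lemma pvmod_add (a c : Int) : PySem.Int.mod (PySem.Int.mod a 4 + c) 4 = PySem.Int.mod (a + c) 4 := by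
  rw [PySem.Int.mod_eq_emod_of_pos (by norm_num), PySem.Int.mod_eq_emod_of_pos (by norm_num), PySem.Int.mod_eq_emod_of_pos (by norm_num)]
  omega

lemma pvmod_idem (a : Int) : PySem.Int.mod (PySem.Int.mod a 4) 4 = PySem.Int.mod a 4 := by
  have h := pvmod_add a 0
  simp only [add_zero] at h
  exact h

lemma stepA (n : Nat) (img : List (List (Int × Int × Int))) (passed : List (Int × Int)) (y x : Int) (directions : List String) (i start_i : Int) :
    checkFuel (n + 1) img passed y x directions i start_i =
      if stepCond img passed y x directions (PySem.Int.mod i 4) = true then PySem.Int.mod i 4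
      else if PySem.Int.mod (i + 1) 4 = start_i then -1
      else checkFuel n img passed y x directions (PySem.Int.mod (i + 1) 4) start_i := by
  simp only [checkFuel, get_index, stepCond, pvmod_add, pvmod_idem, decide_eq_true_eq]

lemma pvOffsets_getD (d : String) : pvOffsets.getD d (0, 0) =
    if d = "right" then (0, 40) else if d = "down" then (40, 0)
    else if d = "left" then (0, -40) else if d = "up" then (-40, 0) else (0, 0) := by
  simp only [pvOffsets, PySem.Dict.ofList, PySem.Dict.getD_eq_get?_getD, PySem.Dict.update,
    PySem.Dict.empty, List.foldl, PySem.Dict.get?_insert]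
  by_cases h1 : d = "right" <;> by_cases h2 : d = "down" <;> by_cases h3 : d = "left" <;>
    by_cases h4 : d = "up" <;> simp_all [PySem.Dict.get?]

-- B's bounds-guard + option-match equals A's sentinel-if success test (shared ny/nx).
lemma guard_match (img : List (List (Int × Int × Int))) (passed : List (Int × Int)) (ny nx : Int) (j : Int) (r : Int) :
    (if 0 ≤ ny ∧ 0 ≤ nx then
       match (PySem.List.pyGet? img ny).bind (fun row => PySem.List.pyGet? row nx) with
       | none => r
       | some pixel => if pixel ≠ (255, 0, 0) ∧ ¬ (ny, nx) ∈ passed then j else r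
     else r)
    = if ((if nx < 0 ∨ ny < 0 then ((255, 0, 0) : Int × Int × Int)
           else ((PySem.List.pyGet? img ny).bind (fun row => PySem.List.pyGet? row nx)).getD (255, 0, 0)) ≠ (255, 0, 0)
          ∧ ¬ (ny, nx) ∈ passed) then j else r := by
  by_cases hg : 0 ≤ ny ∧ 0 ≤ nx
  · have hng : ¬ (nx < 0 ∨ ny < 0) := by omega
    rcases hopt : (PySem.List.pyGet? img ny).bind (fun row => PySem.List.pyGet? row nx) with _ | p
    · simp [hg, hng]
    · simp only [hg, if_neg hng, Option.getD_some]
      by_cases hp : p = ((255, 0, 0) : Int × Int × Int) <;> simp [hp]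
  · have hng : nx < 0 ∨ ny < 0 := by omega
    simp [hg, hng]

lemma stepB (img : List (List (Int × Int × Int))) (passed : List (Int × Int)) (y x : Int) (directions : List String) (j : Int) (rest : List Int) :
    scanDirs img passed y x directions (j :: rest) =
      if stepCond img passed y x directions j = true then j
      else scanDirs img passed y x directions rest := by
  simp only [scanDirs, stepCond, pvOffsets_getD, decide_eq_true_eq]
  by_cases h1 : (PySem.List.pyGet? directions j).getD "" = "right" <;>
    by_cases h2 : (PySem.List.pyGet? directions j).getD "" = "down" <;>
    by_cases h3 : (PySem.List.pyGet? directions j).getD "" = "left" <;>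
    by_cases h4 : (PySem.List.pyGet? directions j).getD "" = "up" <;>
    first
      | (exfalso; simp_all; done)
      | (simp only [h1, h2, h3, h4, update, String.reduceEq, reduceIte]
         rw [guard_match]
         norm_num [sub_eq_add_neg])

lemma main_eq (img : List (List (Int × Int × Int))) (passed : List (Int × Int)) (y x : Int) (directions : List String) (i start_i : Int) :
    check img passed y x directions i start_i = check_alt img passed y x directions i start_i := by
  have e2 : i + 1 + 1 = i + 2 := by ring
  have e3 : i + 2 + 1 = i + 3 := by ring
  have m4 : PySem.Int.mod (i + 3 + 1) 4 = PySem.Int.mod i 4 := by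
    rw [PySem.Int.mod_eq_emod_of_pos (by norm_num), PySem.Int.mod_eq_emod_of_pos (by norm_num)]
    omega
  simp only [check, check_alt, orderFrom, pvmod_add]
  rw [show (4 : Nat) = 3 + 1 from rfl, stepA]
  by_cases c0 : stepCond img passed y x directions (PySem.Int.mod i 4) = true
  · rw [stepB, if_pos c0, if_pos c0]
  · rw [stepB, if_neg c0, if_neg c0]
    by_cases s1 : PySem.Int.mod (i + 1) 4 = start_i
    · rw [if_pos s1, if_pos s1]; rfl
    · simp only [if_neg s1]
      rw [show (3 : Nat) = 2 + 1 from rfl, stepA]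
      simp only [pvmod_idem, pvmod_add, e2]
      rw [stepB]
      by_cases c1 : stepCond img passed y x directions (PySem.Int.mod (i + 1) 4) = true
      · rw [if_pos c1, if_pos c1]
      · rw [if_neg c1, if_neg c1]
        by_cases s2 : PySem.Int.mod (i + 2) 4 = start_i
        · rw [if_pos s2, if_pos s2]; rfl
        · simp only [if_neg s2]
          rw [show (2 : Nat) = 1 + 1 from rfl, stepA]
          simp only [pvmod_idem, pvmod_add, e3]
          rw [stepB]
          by_cases c2 : stepCond img passed y x directions (PySem.Int.mod (i + 2) 4) = true
          · rw [if_pos c2, if_pos c2]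
          · rw [if_neg c2, if_neg c2]
            by_cases s3 : PySem.Int.mod (i + 3) 4 = start_i
            · rw [if_pos s3, if_pos s3]; rfl
            · simp only [if_neg s3]
              rw [show (1 : Nat) = 0 + 1 from rfl, stepA]
              simp only [pvmod_idem, pvmod_add, m4]
              rw [stepB]
              by_cases c3 : stepCond img passed y x directions (PySem.Int.mod (i + 3) 4) = true
              · rw [if_pos c3, if_pos c3]
              · rw [if_neg c3, if_neg c3]
                simp [scanDirs, checkFuel]

-- ===== VERDICT (by name: the statement is the Claim_ definition above) =====
theorem check_spec : Claim_equal_check := by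
  intro img passed y x directions i start_i _ _
  unfold Spec_check
  exact main_eq img passed y x directions i start_i
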